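-- pv_equiv track=rewrite | github.com/dotjax/zenura | modules/language/core/algorithms/experimental/dynamic.py | classify_entities
-- ===== SOURCE A (Python) =====
-- def classify_entities(entities):
--     """Classify entities into categories."""
--     categories = {"Person": ["John", "Mary"], "Location": ["Paris", "London"], "Organization": ["Google", "Microsoft"]}
--     classified = {}
--     for entity in entities:
--         for category, examples in categories.items():
--             if entity in examples:
--                 classified[entity] = category
--     return classified
-- ===== SOURCE B (Python) =====
-- def classify_entities(entities):
--     """Classify entities into categories."""
--     categories = {"Person": ["John", "Mary"], "Location": ["Paris", "London"], "Organization": ["Google", "Microsoft"]}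
--     lookup = {ex: cat for cat, exs in categories.items() for ex in exs}
--     classified = {}
--     for entity in entities:
--         if entity in lookup:
--             classified[entity] = lookup[entity]
--     return classified
-- ===== Notes on version B (the rewrite author's own statement) =====
-- stated objective: simpler
-- what changed: B precomputes a reverse index example->category once and does a single pass over entities with one lookup each, eliminating A's inner loop over categories.
import Mathlib
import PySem

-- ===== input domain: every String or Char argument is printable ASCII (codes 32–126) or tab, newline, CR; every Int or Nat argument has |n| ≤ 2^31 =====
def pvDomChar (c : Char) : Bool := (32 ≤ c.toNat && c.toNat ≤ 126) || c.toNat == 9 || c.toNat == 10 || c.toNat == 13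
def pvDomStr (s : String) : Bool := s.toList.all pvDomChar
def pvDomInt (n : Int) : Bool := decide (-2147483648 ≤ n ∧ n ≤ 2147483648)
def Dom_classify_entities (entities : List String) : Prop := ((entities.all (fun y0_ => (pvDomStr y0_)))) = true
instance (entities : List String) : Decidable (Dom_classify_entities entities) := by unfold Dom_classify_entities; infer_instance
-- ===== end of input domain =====

-- B replaces A's inner loop over categories by a precomputed reverse index (example -> category)
-- and a single lookup per entity: simpler control flow, same return value.

-- ===== PORT A =====
def pvCategories : List (String × List String) :=
  [("Person", ["John", "Mary"]), ("Location", ["Paris", "London"]),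
   ("Organization", ["Google", "Microsoft"])]

def classify_entities (entities : List String) : List (String × String) :=
  (entities.foldl (fun classified entity =>
      pvCategories.foldl (fun classified p =>
        if entity ∈ p.2 then classified.insert entity p.1 else classified) classified)
    (PySem.Dict.empty : PySem.Dict String String)).items

-- ===== PORT B =====
def pvLookup : PySem.Dict String String :=
  pvCategories.foldl (fun d p => p.2.foldl (fun d ex => d.insert ex p.1) d) PySem.Dict.empty

def classify_entities_alt (entities : List String) : List (String × String) :=
  (entities.foldl (fun classified entity =>
      match pvLookup.get? entity with
      | some cat => classified.insert entity cat
      | none => classified)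
    (PySem.Dict.empty : PySem.Dict String String)).items

-- ===== PRECONDITION & SPEC =====
def Spec_classify_entities (entities : List String) (out : List (String × String)) : Prop := out = classify_entities_alt entities
instance (entities : List String) (out : List (String × String)) : Decidable (Spec_classify_entities entities out) := by unfold Spec_classify_entities; infer_instance

-- ===== CLAIM (what is proved, stated in full; the proofs are below) =====
def Claim_equal_classify_entities : Prop := ∀ (entities : List String), Dom_classify_entities entities → Spec_classify_entities entities (classify_entities entities)

-- ===== LEMMAS AND PROOFS =====

-- per-entity step: A's inner loop over the three categories equals B's single reverse-index lookup
theorem pv_step_eq (classified : PySem.Dict String String) (entity : String) :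
    pvCategories.foldl (fun classified p =>
        if entity ∈ p.2 then classified.insert entity p.1 else classified) classified =
    (match pvLookup.get? entity with
     | some cat => classified.insert entity cat
     | none => classified) := by
  have ev : ∀ e : String, pvLookup.get? e =
      (if "John" == e then some "Person" else if "Mary" == e then some "Person"
       else if "Paris" == e then some "Location" else if "London" == e then some "Location"
       else if "Google" == e then some "Organization" else if "Microsoft" == e then some "Organization"
       else none) := by
    intro e
    show (PySem.Dict.mk [("John", "Person"), ("Mary", "Person"), ("Paris", "Location"),
        ("London", "Location"), ("Google", "Organization"), ("Microsoft", "Organization")]).get? e = _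
    simp only [PySem.Dict.get?]
    split_ifs <;> simp_all
  rw [ev]
  by_cases h1 : entity = "John"
  · subst h1; simp [pvCategories]
  by_cases h2 : entity = "Mary"
  · subst h2; simp [pvCategories]
  by_cases h3 : entity = "Paris"
  · subst h3; simp [pvCategories]
  by_cases h4 : entity = "London"
  · subst h4; simp [pvCategories]
  by_cases h5 : entity = "Google"
  · subst h5; simp [pvCategories]
  by_cases h6 : entity = "Microsoft"
  · subst h6; simp [pvCategories]
  simp [pvCategories, Ne.symm h1, Ne.symm h2, Ne.symm h3, Ne.symm h4, Ne.symm h5, Ne.symm h6, h1, h2, h3, h4, h5, h6]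


theorem pv_fold_eq (entities : List String) (classified : PySem.Dict String String) :
    entities.foldl (fun classified entity =>
        pvCategories.foldl (fun classified p =>
          if entity ∈ p.2 then classified.insert entity p.1 else classified) classified) classified =
    entities.foldl (fun classified entity =>
        match pvLookup.get? entity with
        | some cat => classified.insert entity cat
        | none => classified) classified := by
  induction entities generalizing classified with
  | nil => rfl
  | cons e rest ih => simp only [List.foldl_cons, pv_step_eq]

-- ===== VERDICT (by name: the statement is the Claim_ definition above) =====
theorem classify_entities_spec : Claim_equal_classify_entities := by
  intro entities _
  unfold Spec_classify_entities classify_entities classify_entities_alt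
  rw [pv_fold_eq]
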